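-- pv_equiv track=rewrite | github.com/Lee-JunH/python_study | Programmers/sniffling_tree.py | solution
-- ===== SOURCE A (Python) =====
-- from collections import defaultdict
--
-- def check_child(my_nodes, node, vis, cnt):
--     vis.add(node)
--
--     # 홀수 노드
--     if node % 2 == 1 and len(my_nodes[node]) % 2 == 1:
--         cnt[0] += 1
--     # 짝수 노드
--     if node % 2 == 0 and len(my_nodes[node]) % 2 == 0:
--         cnt[1] += 1
--     # 역홀수 노드
--     if node % 2 == 1 and len(my_nodes[node]) % 2 == 0:
--         cnt[2] += 1
--     # 역짝수 노드
--     if node % 2 == 0 and len(my_nodes[node]) % 2 == 1: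
--         cnt[3] += 1
--
--     for n in my_nodes[node]:    # 나머지 자식들도 확인
--         if n in vis:
--             continue
--         check_child(my_nodes, n, vis, cnt)
--     return
--
-- def solution(nodes, edges):
--     my_nodes = defaultdict(set)
--
--     for a, b in edges:      # 먼저 노드 연결
--         my_nodes[a].add(b)
--         my_nodes[b].add(a)
--
--     sniffling = 0
--     reverse_s = 0
--
--     vis = set()
--     for node in nodes:
--         if node not in vis:
--             vis.add(node)
--
--             cnt = [0,0,0,0]
--             check_child(my_nodes, node, vis, cnt)
--
--             if cnt[0] + cnt[1] == 1:
--                 sniffling += 1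
--             if cnt[2] + cnt[3] == 1:
--                 reverse_s += 1
--
--     return (sniffling, reverse_s)
-- ===== SOURCE B (Python) =====
-- def solution(nodes, edges):
--     adj = {}
--     for a, b in edges:
--         adj.setdefault(a, set()).add(b)
--         adj.setdefault(b, set()).add(a)
--
--     sniffling = 0
--     reverse_s = 0
--     visited = set()
--     for node in nodes:
--         if node in visited:
--             continue
--         match = 0
--         mismatch = 0
--         stack = [node]
--         while stack:
--             v = stack.pop()
--             if v in visited:
--                 continue
--             visited.add(v)
--             nbrs = adj.get(v, ())
--             if v % 2 == len(nbrs) % 2: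
--                 match += 1
--             else:
--                 mismatch += 1
--             stack.extend(nbrs)
--         if match == 1:
--             sniffling += 1
--         if mismatch == 1:
--             reverse_s += 1
--     return (sniffling, reverse_s)
-- ===== Notes on version B (the rewrite author's own statement) =====
-- stated objective: faster
-- what changed: The recursive shared-visited DFS (check_child, with a 4-slot category counter list) is replaced by an explicit-stack worklist loop per component that maintains only a (parity-match, parity-mismatch) pair; the adjacency dict of sets is built the same way so degrees and components are identical.
import Mathlib
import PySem

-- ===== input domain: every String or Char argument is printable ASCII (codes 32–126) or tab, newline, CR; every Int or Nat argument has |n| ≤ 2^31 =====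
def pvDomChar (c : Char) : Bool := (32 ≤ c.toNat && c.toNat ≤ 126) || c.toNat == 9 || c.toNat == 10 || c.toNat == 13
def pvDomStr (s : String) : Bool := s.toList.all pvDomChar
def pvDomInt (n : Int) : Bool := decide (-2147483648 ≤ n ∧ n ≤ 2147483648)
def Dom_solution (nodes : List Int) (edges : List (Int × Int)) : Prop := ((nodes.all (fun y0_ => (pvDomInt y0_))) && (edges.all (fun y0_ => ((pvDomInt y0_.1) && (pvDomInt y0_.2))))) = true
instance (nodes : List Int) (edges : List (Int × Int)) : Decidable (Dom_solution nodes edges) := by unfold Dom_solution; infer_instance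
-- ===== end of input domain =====

-- B replaces A's recursive shared-visited DFS with an explicit-stack worklist loop and collapses the
-- four per-node category counters into a (parity-match, parity-mismatch) pair; same return value.

-- ===== PORT A =====

-- adjacency build shared by both ports (both Pythons build the identical dict of sets):
-- for a, b in edges: my_nodes[a].add(b); my_nodes[b].add(a)
def buildAdj (edges : List (Int × Int)) : PySem.Dict Int (PySem.Set Int) :=
  edges.foldl (fun d p =>
    let d := d.modify p.1 PySem.Set.empty (fun s => PySem.Set.add s p.2)
    d.modify p.2 PySem.Set.empty (fun s => PySem.Set.add s p.1)) PySem.Dict.empty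

-- all integers occurring as a dict value element (used only to size A's structural fuel)
def allVals (adj : PySem.Dict Int (PySem.Set Int)) : List Int := adj.values.flatten

-- the four ifs at the top of check_child (cnt[0],cnt[1],cnt[2],cnt[3] as a 4-tuple)
def bumpA (node : Int) (deg : Nat) (c : Int × Int × Int × Int) : Int × Int × Int × Int :=
  let c := if PySem.Int.mod node 2 = 1 ∧ deg % 2 = 1 then (c.1 + 1, c.2) else c
  let c := if PySem.Int.mod node 2 = 0 ∧ deg % 2 = 0 then (c.1, c.2.1 + 1, c.2.2) else c
  let c := if PySem.Int.mod node 2 = 1 ∧ deg % 2 = 0 then (c.1, c.2.1, c.2.2.1 + 1, c.2.2.2) else c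
  let c := if PySem.Int.mod node 2 = 0 ∧ deg % 2 = 1 then (c.1, c.2.1, c.2.2.1, c.2.2.2 + 1) else c
  c

-- check_child, with a structural fuel that (provably) never runs out: along every chain of nested
-- calls each level adds a previously unvisited element, so depth ≤ |allVals| + 2.
mutual
def checkChild (adj : PySem.Dict Int (PySem.Set Int)) :
    Nat → Int → PySem.Set Int → Int × Int × Int × Int → PySem.Set Int × (Int × Int × Int × Int)
  | 0, _, vis, cnt => (vis, cnt)   -- fuel exhausted: unreachable for the fuel solution passes
  | fuel + 1, node, vis, cnt =>
    let vis := PySem.Set.add vis node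
    let nbrs : PySem.Set Int := adj.getD node PySem.Set.empty
    let cnt := bumpA node nbrs.length cnt
    ccList adj fuel nbrs vis cnt
termination_by fuel _ _ _ => (fuel, 0)

-- 'for n in my_nodes[node]: if n in vis: continue; check_child(...)'
def ccList (adj : PySem.Dict Int (PySem.Set Int)) :
    Nat → List Int → PySem.Set Int → Int × Int × Int × Int → PySem.Set Int × (Int × Int × Int × Int)
  | _, [], vis, cnt => (vis, cnt)
  | fuel, n :: rest, vis, cnt =>
    if PySem.Set.contains vis n then ccList adj fuel rest vis cnt
    else
      let r := checkChild adj fuel n vis cnt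
      ccList adj fuel rest r.1 r.2
termination_by fuel ns _ _ => (fuel, ns.length + 1)
end

-- the body of A's 'for node in nodes' loop (state = (sniffling, reverse_s, vis))
def solStep (adj : PySem.Dict Int (PySem.Set Int)) (fuel : Nat)
    (st : Int × Int × PySem.Set Int) (node : Int) : Int × Int × PySem.Set Int :=
  if PySem.Set.contains st.2.2 node then st
  else
    let vis := PySem.Set.add st.2.2 node
    let r := checkChild adj fuel node vis (0, 0, 0, 0)
    let sniff := if r.2.1 + r.2.2.1 = 1 then st.1 + 1 else st.1
    let rev := if r.2.2.2.1 + r.2.2.2.2 = 1 then st.2.1 + 1 else st.2.1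
    (sniff, rev, r.1)

def solution (nodes : List Int) (edges : List (Int × Int)) : Int × Int :=
  let adj := buildAdj edges
  let fuel := (allVals adj).length + 2
  let res := nodes.foldl (solStep adj fuel) (0, 0, PySem.Set.empty)
  (res.1, res.2.1)

-- ===== PORT B =====

-- termination measure for the worklist loop: stack length plus, for every still-unvisited key,
-- one plus its neighbour count (each visit removes its own future pushes from the budget)
def phiB (adj : PySem.Dict Int (PySem.Set Int)) (stk : List Int) (vis : PySem.Set Int) : Nat :=
  stk.length +
    (((adj.keys.filter (fun k => !(PySem.Set.contains vis k))).map
      (fun k => 1 + (adj.getD k PySem.Set.empty).length)).sum)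

theorem sum_filter_ne_le (l : List Int) (w : Int → Nat) (v : Int) (hv : v ∈ l) :
    ((l.filter (fun k => !(k == v))).map w).sum + w v ≤ (l.map w).sum := by
  induction l with
  | nil => cases hv
  | cons x xs ih =>
    rcases eq_or_ne x v with rfl | hx
    · have hsub : ((xs.filter (fun k => !(k == x))).map w).Sublist (xs.map w) :=
        List.filter_sublist.map w
      have h2 := hsub.sum_le_sum (fun z _ => Nat.zero_le z)
      simp only [List.filter_cons]
      rw [if_neg (by simp)]
      simp only [List.map_cons, List.sum_cons]
      omega
    · have hv' : v ∈ xs := List.mem_of_ne_of_mem (Ne.symm hx) hv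
      have h2 := ih hv'
      simp only [List.filter_cons]
      rw [if_pos (by simp [hx])]
      simp only [List.map_cons, List.sum_cons]
      omega

theorem phiB_dec_visited (adj : PySem.Dict Int (PySem.Set Int)) (stk : List Int)
    (vis : PySem.Set Int) (v : Int) : phiB adj stk vis < phiB adj (v :: stk) vis := by
  simp [phiB]

theorem phiB_dec_new (adj : PySem.Dict Int (PySem.Set Int)) (stk : List Int)
    (vis : PySem.Set Int) (v : Int) (hv : v ∉ vis) :
    phiB adj ((adj.getD v PySem.Set.empty : List Int) ++ stk) (PySem.Set.add vis v) <
      phiB adj (v :: stk) vis := by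
  have hkeys : adj.keys.filter (fun k => !(PySem.Set.contains (PySem.Set.add vis v) k))
      = (adj.keys.filter (fun k => !(PySem.Set.contains vis k))).filter (fun k => !(k == v)) := by
    rw [List.filter_filter]
    apply List.filter_congr
    intro k _
    have h1 : (PySem.Set.contains (PySem.Set.add vis v) k = true) ↔ (k ∈ vis ∨ k = v) :=
      (PySem.Set.contains_iff (PySem.Set.add vis v) k).trans (PySem.Set.mem_add vis v k)
    have h2 : (PySem.Set.contains vis k = true) ↔ k ∈ vis := PySem.Set.contains_iff vis k
    by_cases hm : k ∈ vis <;> by_cases hkv : k = v <;> simp_all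
  by_cases hk : v ∈ adj.keys
  · have hvl : v ∈ adj.keys.filter (fun k => !(PySem.Set.contains vis k)) := by
      apply List.mem_filter.2
      refine ⟨hk, ?_⟩
      cases hb : PySem.Set.contains vis v with
      | false => simp
      | true => exact absurd ((PySem.Set.contains_iff vis v).1 hb) hv
    have hsum := sum_filter_ne_le (adj.keys.filter (fun k => !(PySem.Set.contains vis k)))
      (fun k => 1 + (adj.getD k PySem.Set.empty).length) v hvl
    have hsum2 : (((adj.keys.filter (fun k => !(PySem.Set.contains vis k))).filter
          (fun k => !(k == v))).map (fun k => 1 + (adj.getD k PySem.Set.empty).length)).sum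
        + (1 + (adj.getD v PySem.Set.empty).length)
        ≤ ((adj.keys.filter (fun k => !(PySem.Set.contains vis k))).map
          (fun k => 1 + (adj.getD k PySem.Set.empty).length)).sum := hsum
    simp only [phiB, hkeys, List.length_append, List.length_cons]
    omega
  · have hget : adj.getD v PySem.Set.empty = PySem.Set.empty := by
      apply PySem.Dict.getD_of_get?_eq_none
      exact (PySem.Dict.get?_eq_none_iff_not_mem_keys adj v).2 hk
    have hsame : (adj.keys.filter (fun k => !(PySem.Set.contains vis k))).filter (fun k => !(k == v))
        = adj.keys.filter (fun k => !(PySem.Set.contains vis k)) := by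
      apply List.filter_eq_self.2
      intro k hkmem
      have : k ∈ adj.keys := (List.mem_filter.1 hkmem).1
      simp only [Bool.not_eq_true', beq_eq_false_iff_ne]
      intro h; exact hk (h ▸ this)
    simp only [phiB, hkeys, hsame, hget, List.length_append, List.length_cons]
    simp [PySem.Set.empty]

def stackLoop (adj : PySem.Dict Int (PySem.Set Int)) :
    List Int → PySem.Set Int → Int × Int → PySem.Set Int × (Int × Int)
  | [], vis, mc => (vis, mc)
  | v :: stk, vis, mc =>
    if PySem.Set.contains vis v then stackLoop adj stk vis mc
    else
      let vis' := PySem.Set.add vis v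
      let nbrs : PySem.Set Int := adj.getD v PySem.Set.empty
      let mc' := if PySem.Int.mod v 2 = ((nbrs.length % 2 : Nat) : Int)
        then (mc.1 + 1, mc.2) else (mc.1, mc.2 + 1)
      stackLoop adj (nbrs ++ stk) vis' mc'
termination_by stk vis _ => phiB adj stk vis
decreasing_by
  · exact phiB_dec_visited adj stk vis v
  · exact phiB_dec_new adj stk vis v (by simpa using ‹¬ PySem.Set.contains vis v = true›)

-- the body of B's 'for node in nodes' loop
def solStepAlt (adj : PySem.Dict Int (PySem.Set Int))
    (st : Int × Int × PySem.Set Int) (node : Int) : Int × Int × PySem.Set Int :=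
  if PySem.Set.contains st.2.2 node then st
  else
    let r := stackLoop adj [node] st.2.2 (0, 0)
    let sniff := if r.2.1 = 1 then st.1 + 1 else st.1
    let rev := if r.2.2 = 1 then st.2.1 + 1 else st.2.1
    (sniff, rev, r.1)

def solution_alt (nodes : List Int) (edges : List (Int × Int)) : Int × Int :=
  let adj := buildAdj edges
  let res := nodes.foldl (solStepAlt adj) (0, 0, PySem.Set.empty)
  (res.1, res.2.1)

-- ===== PRECONDITION & SPEC =====
def Spec_solution (nodes : List Int) (edges : List (Int × Int)) (out : Int × Int) : Prop := out = solution_alt nodes edges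
instance (nodes : List Int) (edges : List (Int × Int)) (out : Int × Int) : Decidable (Spec_solution nodes edges out) := by unfold Spec_solution; infer_instance

-- ===== CLAIM (what is proved, stated in full; the proofs are below) =====
def Claim_equal_solution : Prop := ∀ (nodes : List Int) (edges : List (Int × Int)), Dom_solution nodes edges → Spec_solution nodes edges (solution nodes edges)

-- ===== LEMMAS AND PROOFS =====

-- abstraction: B's (match, mismatch) pair from A's four counters
def sumPair (c : Int × Int × Int × Int) : Int × Int := (c.1 + c.2.1, c.2.2.1 + c.2.2.2)

theorem sumPair_bumpA (node : Int) (deg : Nat) (c : Int × Int × Int × Int) :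
    sumPair (bumpA node deg c) =
      if PySem.Int.mod node 2 = ((deg % 2 : Nat) : Int)
      then ((sumPair c).1 + 1, (sumPair c).2) else ((sumPair c).1, (sumPair c).2 + 1) := by
  obtain ⟨c0, c1, c2, c3⟩ := c
  rcases PySem.Int.mod_two_eq node with h | h <;>
    rcases Nat.mod_two_eq_zero_or_one deg with h2 | h2 <;>
      simp only [bumpA, sumPair, h, h2, Nat.cast_zero, Nat.cast_one] <;>
        norm_num [Prod.ext_iff] <;> omega

theorem getD_subset_allVals (adj : PySem.Dict Int (PySem.Set Int)) (k x : Int)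
    (hx : x ∈ (adj.getD k PySem.Set.empty : List Int)) : x ∈ allVals adj := by
  cases hq : adj.get? k with
  | none =>
    rw [PySem.Dict.getD_of_get?_eq_none adj _ hq] at hx
    cases hx
  | some v =>
    have hit := PySem.Dict.mem_items_of_get?_eq_some adj hq
    have hval : v ∈ adj.values := by
      simp only [PySem.Dict.values]
      exact List.mem_map.2 ⟨(k, v), hit, rfl⟩
    have hgd : adj.getD k PySem.Set.empty = v := by
      simp [PySem.Dict.getD_eq_get?_getD, hq]
    rw [hgd] at hx
    exact List.mem_flatten.2 ⟨v, hval, hx⟩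

-- vis only grows through check_child / its neighbour loop
theorem cc_vis_subset (adj : PySem.Dict Int (PySem.Set Int)) (fuel : Nat) :
    (∀ (node : Int) (vis : PySem.Set Int) (cnt : Int × Int × Int × Int) (x : Int),
      x ∈ vis → x ∈ (checkChild adj fuel node vis cnt).1) ∧
    (∀ (ns : List Int) (vis : PySem.Set Int) (cnt : Int × Int × Int × Int) (x : Int),
      x ∈ vis → x ∈ (ccList adj fuel ns vis cnt).1) := by
  induction fuel using Nat.strong_induction_on with
  | _ fuel ih =>
    have hc : ∀ (node : Int) (vis : PySem.Set Int) (cnt : Int × Int × Int × Int) (x : Int),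
        x ∈ vis → x ∈ (checkChild adj fuel node vis cnt).1 := by
      intro node vis cnt x hx
      cases fuel with
      | zero => simpa [checkChild] using hx
      | succ f =>
        simp only [checkChild]
        exact (ih f (Nat.lt_succ_self f)).2 _ _ _ _ ((PySem.Set.mem_add vis node x).2 (Or.inl hx))
    refine ⟨hc, ?_⟩
    intro ns
    induction ns with
    | nil => intro vis cnt x hx; simpa [ccList] using hx
    | cons n rest ihn =>
      intro vis cnt x hx
      simp only [ccList]
      split
      · exact ihn vis cnt x hx
      · exact ihn _ _ x (hc n vis cnt x hx)

-- measure for the simulation induction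
def muG (adj : PySem.Dict Int (PySem.Set Int)) (ns : List Int) (vis : PySem.Set Int) : Nat :=
  ((ns ++ allVals adj).toFinset \ vis.toFinset).card

theorem muG_mono (adj : PySem.Dict Int (PySem.Set Int)) {ns ns' : List Int}
    {vis vis' : PySem.Set Int} (hns : ∀ x ∈ ns', x ∈ ns) (hvis : ∀ x ∈ vis, x ∈ vis') :
    muG adj ns' vis' ≤ muG adj ns vis := by
  apply Finset.card_le_card
  intro x hx
  simp only [Finset.mem_sdiff, List.mem_toFinset, List.mem_append] at *
  rcases hx with ⟨h1, h2⟩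
  exact ⟨h1.elim (fun h => Or.inl (hns x h)) Or.inr, fun h => h2 (hvis x h)⟩

theorem muG_strict (adj : PySem.Dict Int (PySem.Set Int)) {n : Int} {ns : List Int}
    {vis : PySem.Set Int} (hn : n ∉ vis) :
    muG adj (adj.getD n PySem.Set.empty) (PySem.Set.add vis n) < muG adj (n :: ns) vis := by
  apply Finset.card_lt_card
  constructor
  · intro x hx
    simp only [Finset.mem_sdiff, List.mem_toFinset, List.mem_append, List.mem_cons] at *
    rcases hx with ⟨h1, h2⟩
    refine ⟨Or.inr (h1.elim (fun h => getD_subset_allVals adj n x h) id), fun h => ?_⟩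
    exact h2 ((PySem.Set.mem_add vis n x).2 (Or.inl h))
  · intro hsub
    have hmem : n ∈ ((n :: ns ++ allVals adj).toFinset \ vis.toFinset) := by
      simp only [Finset.mem_sdiff, List.mem_toFinset, List.mem_cons, List.mem_append]
      exact ⟨by simp, fun h => hn h⟩
    have := hsub hmem
    simp only [Finset.mem_sdiff, List.mem_toFinset] at this
    exact this.2 ((PySem.Set.mem_add vis n n).2 (Or.inr rfl))

theorem muG_le_allVals (adj : PySem.Dict Int (PySem.Set Int)) {ns : List Int}
    (vis : PySem.Set Int) (hns : ∀ x ∈ ns, x ∈ allVals adj) :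
    muG adj ns vis ≤ (allVals adj).length := by
  calc muG adj ns vis ≤ ((allVals adj).toFinset).card := by
        apply Finset.card_le_card
        intro x hx
        simp only [Finset.mem_sdiff, List.mem_toFinset, List.mem_append] at *
        exact hx.1.elim (fun h => hns x h) id
    _ ≤ (allVals adj).length := List.toFinset_card_le _

-- the simulation: B's worklist loop runs A's neighbour recursion
theorem sim (adj : PySem.Dict Int (PySem.Set Int)) (N : Nat) :
    ∀ (ns : List Int) (vis : PySem.Set Int) (cnt : Int × Int × Int × Int)
      (stk : List Int) (fuel : Nat),
      muG adj ns vis ≤ N → muG adj ns vis < fuel →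
      stackLoop adj (ns ++ stk) vis (sumPair cnt) =
        stackLoop adj stk (ccList adj fuel ns vis cnt).1
          (sumPair (ccList adj fuel ns vis cnt).2) := by
  induction N using Nat.strong_induction_on with
  | _ N ih =>
    intro ns
    induction ns with
    | nil => intro vis cnt stk fuel _ _; simp [ccList]
    | cons n rest ihn =>
      intro vis cnt stk fuel hN hfuel
      by_cases hv : PySem.Set.contains vis n
      · rw [List.cons_append]
        rw [stackLoop]
        rw [if_pos hv]
        simp only [ccList]
        rw [if_pos hv]
        exact ihn vis cnt stk fuel
          (le_trans (muG_mono adj (fun x hx => List.mem_cons_of_mem n hx) (fun x hx => hx)) hN)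
          (lt_of_le_of_lt (muG_mono adj (fun x hx => List.mem_cons_of_mem n hx) (fun x hx => hx)) hfuel)
      · have hnmem : n ∉ vis := fun h => hv ((PySem.Set.contains_iff vis n).2 h)
        obtain ⟨f, rfl⟩ : ∃ f, fuel = f + 1 := ⟨fuel - 1, by omega⟩
        rw [List.cons_append]
        rw [stackLoop]
        rw [if_neg hv]
        simp only [ccList]
        rw [if_neg hv]
        simp only [checkChild]
        have hstrict := muG_strict adj (ns := rest) hnmem
        have h1 : stackLoop adj ((adj.getD n PySem.Set.empty : List Int) ++ (rest ++ stk))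
            (PySem.Set.add vis n) (sumPair (bumpA n (adj.getD n PySem.Set.empty : List Int).length cnt)) =
            stackLoop adj (rest ++ stk)
              (ccList adj f (adj.getD n PySem.Set.empty) (PySem.Set.add vis n)
                (bumpA n (adj.getD n PySem.Set.empty : List Int).length cnt)).1
              (sumPair (ccList adj f (adj.getD n PySem.Set.empty) (PySem.Set.add vis n)
                (bumpA n (adj.getD n PySem.Set.empty : List Int).length cnt)).2) := by
          apply ih (muG adj (adj.getD n PySem.Set.empty) (PySem.Set.add vis n))
            (lt_of_lt_of_le hstrict hN)
          · exact le_refl _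
          · omega
        rw [← sumPair_bumpA n (adj.getD n PySem.Set.empty : List Int).length cnt]
        rw [h1]
        have hgrow : ∀ x ∈ vis, x ∈ (ccList adj f (adj.getD n PySem.Set.empty) (PySem.Set.add vis n)
            (bumpA n (adj.getD n PySem.Set.empty : List Int).length cnt)).1 := by
          intro x hx
          exact (cc_vis_subset adj f).2 _ _ _ x ((PySem.Set.mem_add vis n x).2 (Or.inl hx))
        have hmu := muG_mono adj (ns := n :: rest) (ns' := rest)
          (fun x hx => List.mem_cons_of_mem n hx) hgrow
        exact ihn _ _ stk (f + 1) (le_trans hmu hN) (lt_of_le_of_lt hmu hfuel)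

-- per-node step equality
theorem step_eq (adj : PySem.Dict Int (PySem.Set Int)) (st : Int × Int × PySem.Set Int) (node : Int) :
    solStep adj ((allVals adj).length + 2) st node = solStepAlt adj st node := by
  by_cases hv : PySem.Set.contains st.2.2 node
  · have hm : node ∈ st.2.2 := (PySem.Set.contains_iff _ _).1 hv
    simp [solStep, solStepAlt, hm]
  · simp only [solStep, solStepAlt]
    simp only [if_neg hv]
    have hL2 : (allVals adj).length + 2 = ((allVals adj).length + 1) + 1 := rfl
    rw [hL2]
    simp only [checkChild, stackLoop]
    simp only [if_neg hv]
    rw [PySem.Set.add_of_mem ((PySem.Set.mem_add st.2.2 node node).2 (Or.inr rfl))]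
    have hb : (if PySem.Int.mod node 2 =
          (((adj.getD node PySem.Set.empty : List Int).length % 2 : Nat) : Int)
        then ((0:Int) + 1, (0:Int)) else ((0:Int), (0:Int) + 1))
        = sumPair (bumpA node (adj.getD node PySem.Set.empty : List Int).length (0, 0, 0, 0)) := by
      rw [sumPair_bumpA]; simp [sumPair]
    rw [hb]
    have hsim := sim adj (muG adj (adj.getD node PySem.Set.empty) (PySem.Set.add st.2.2 node))
      (adj.getD node PySem.Set.empty) (PySem.Set.add st.2.2 node)
      (bumpA node (adj.getD node PySem.Set.empty : List Int).length (0, 0, 0, 0))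
      [] ((allVals adj).length + 1) (le_refl _)
      (by
        have := muG_le_allVals adj (PySem.Set.add st.2.2 node)
          (fun x hx => getD_subset_allVals adj node x hx)
        omega)
    rw [hsim]
    simp [stackLoop, sumPair]

theorem solution_eq_alt (nodes : List Int) (edges : List (Int × Int)) :
    solution nodes edges = solution_alt nodes edges := by
  have h : solStep (buildAdj edges) ((allVals (buildAdj edges)).length + 2)
      = solStepAlt (buildAdj edges) :=
    funext fun st => funext fun node => step_eq (buildAdj edges) st node
  simp only [solution, solution_alt, h]

-- ===== VERDICT (by name: the statement is the Claim_ definition above) =====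
theorem solution_spec : Claim_equal_solution := by
  intro nodes edges _
  unfold Spec_solution
  exact solution_eq_alt nodes edges
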